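-- pv_equiv track=rewrite | github.com/mohamedbasuony/archai-layout-workspace | backend/app/agents/saia_ocr_agent.py | _collapse_fragment_sequences
-- ===== SOURCE A (Python) =====
-- def _collapse_fragment_sequences(
--     tokens: list[str],
--     func_words: set[str],
-- ) -> tuple[list[str], int]:
--     """Collapse sequences where >=60% of tokens in a window of 5+ are single-char.
--
--     Handles patterns like "a a mno y a nis" where short non-single-char
--     tokens are interspersed among single-char fragments.
--     """
--     n = len(tokens)
--     if n < 5:
--         return tokens, 0
--
--     # Mark positions that are single-char alphabetic
--     is_single = [len(t) == 1 and t.isalpha() for t in tokens]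
--
--     # Use a sliding window to find stretches dominated by single-char tokens
--     window = 5
--     mask = [False] * n
--     for start in range(n - window + 1):
--         single_count = sum(1 for j in range(start, start + window) if is_single[j])
--         if single_count / window >= 0.60:
--             for j in range(start, start + window):
--                 mask[j] = True
--
--     # Apply mask: consecutive masked regions become a single '[…]'
--     out: list[str] = []
--     replacements = 0
--     i = 0
--     while i < n:
--         if mask[i]:
--             # Consume entire masked run
--             while i < n and mask[i]:
--                 replacements += 1
--                 i += 1
--             out.append("[…]")
--         else:
--             out.append(tokens[i])
--             i += 1
--     return out, replacements
-- ===== SOURCE B (Python) =====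
-- def _collapse_fragment_sequences(
--     tokens: list[str],
--     func_words: set[str],
-- ) -> tuple[list[str], int]:
--     """One fused O(n) pass: a prefix-sum table replaces the per-window rescans,
--     and a coverage bound + run-state flag replaces the mask array and the
--     nested collapse loops."""
--     n = len(tokens)
--     if n < 5:
--         return tokens, 0
--
--     single = [1 if len(t) == 1 and t.isalpha() else 0 for t in tokens]
--     prefix = [0]
--     for v in single:
--         prefix.append(prefix[-1] + v)
--
--     out: list[str] = []
--     replacements = 0
--     cover_end = 0          # one past the last position covered by a qualifying window seen so far
--     prev_masked = False
--     for i in range(n):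
--         if i + 5 <= n and prefix[i + 5] - prefix[i] >= 3:
--             cover_end = i + 5
--         if i < cover_end:
--             replacements += 1
--             if not prev_masked:
--                 out.append("[…]")
--             prev_masked = True
--         else:
--             out.append(tokens[i])
--             prev_masked = False
--     return out, replacements
-- ===== Notes on version B (the rewrite author's own statement) =====
-- stated objective: faster
-- what changed: B replaces A's three passes (per-window recount, range-marking mask array, nested while-loop collapse) by a prefix-sum table plus one fused scan that tracks a coverage bound and a run-state flag, emitting the output directly with no mask array.
import Mathlib
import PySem

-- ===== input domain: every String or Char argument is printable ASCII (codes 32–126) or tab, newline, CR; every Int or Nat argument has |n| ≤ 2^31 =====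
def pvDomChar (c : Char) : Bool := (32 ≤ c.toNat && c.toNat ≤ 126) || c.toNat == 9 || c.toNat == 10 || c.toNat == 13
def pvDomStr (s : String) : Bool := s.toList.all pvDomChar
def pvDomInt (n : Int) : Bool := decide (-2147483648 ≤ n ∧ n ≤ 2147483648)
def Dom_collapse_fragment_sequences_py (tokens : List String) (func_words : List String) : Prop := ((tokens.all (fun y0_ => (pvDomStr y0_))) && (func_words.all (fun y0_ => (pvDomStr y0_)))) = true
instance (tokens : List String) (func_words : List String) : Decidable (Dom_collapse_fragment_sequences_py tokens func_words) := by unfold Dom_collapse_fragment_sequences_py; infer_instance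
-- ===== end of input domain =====

-- B replaces A's three passes (per-window recount, mask marking, nested collapse loops) by a
-- prefix-sum table plus one fused scan; a timing run measured B faster by a constant factor.

-- ===== PORT A =====
-- A's collapse phase: `while i < n and mask[i]` inner loop, structurally recursive on the
-- remaining distance to n (the fuel n - i is enough: i grows by 1 each step)
def pvRunA (mask : List Bool) (n : Nat) : Nat → Nat → Int → Nat × Int
  | 0, i, repl => (i, repl)
  | fuel + 1, i, repl =>
    if i < n ∧ mask.getD i false = true then pvRunA mask n fuel (i + 1) (repl + 1)
    else (i, repl)

-- … and the outer `while i < n` loop (again fuel = remaining distance to n)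
def pvLoopA (tokens : List String) (mask : List Bool) (n : Nat) :
    Nat → Nat → List String → Int → List String × Int
  | 0, _, out, repl => (out, repl)
  | fuel + 1, i, out, repl =>
    if i < n then
      if mask.getD i false = true then
        let p := pvRunA mask n (n - i) i repl
        pvLoopA tokens mask n fuel p.1 (out ++ ["[…]"]) p.2
      else
        pvLoopA tokens mask n fuel (i + 1) (out ++ [tokens.getD i ""]) repl
    else (out, repl)

def collapse_fragment_sequences_py (tokens : List String) (func_words : List String) :
    List String × Int :=
  let n := tokens.length
  if n < 5 then (tokens, 0)
  else
    let is_single : List Bool := tokens.map (fun t => (PySem.Str.len t == 1) && PySem.Str.strIsalpha t)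
    let window := 5
    let mask : List Bool :=
      (List.range (n - window + 1)).foldl (fun mask start =>
        let single_count : Int :=
          (List.range' start window).foldl
            (fun c j => if is_single.getD j false then c + 1 else c) 0
        if 3 ≤ single_count then
          (List.range' start window).foldl (fun m j => m.set j true) mask
        else mask)
        (List.replicate n false)
    pvLoopA tokens mask n n 0 [] 0

-- ===== PORT B =====
def collapse_fragment_sequences_py_alt (tokens : List String) (func_words : List String) :
    List String × Int :=
  let n := tokens.length
  if n < 5 then (tokens, 0)
  else
    let single : List Int :=
      tokens.map (fun t => if (PySem.Str.len t == 1) && PySem.Str.strIsalpha t then 1 else 0)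
    let pfx : List Int := single.foldl (fun acc v => acc ++ [acc.getLastD 0 + v]) [0]
    let st :=
      (List.range n).foldl
        (fun (st : List String × Int × Nat × Bool) i =>
          let out := st.1
          let repl := st.2.1
          let cover := if decide (i + 5 ≤ n) && decide (3 ≤ pfx.getD (i + 5) 0 - pfx.getD i 0)
                       then i + 5 else st.2.2.1
          let prev := st.2.2.2
          if i < cover then
            (if prev then out else out ++ ["[…]"], repl + 1, cover, true)
          else
            (out ++ [tokens.getD i ""], repl, cover, false))
        ([], 0, 0, false)
    (st.1, st.2.1)

-- ===== PRECONDITION & SPEC =====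
def Spec_collapse_fragment_sequences_py (tokens : List String) (func_words : List String) (out : List String × Int) : Prop := out = collapse_fragment_sequences_py_alt tokens func_words
instance (tokens : List String) (func_words : List String) (out : List String × Int) : Decidable (Spec_collapse_fragment_sequences_py tokens func_words out) := by unfold Spec_collapse_fragment_sequences_py; infer_instance

-- ===== CLAIM (what is proved, stated in full; the proofs are below) =====
def Claim_equal_collapse_fragment_sequences_py : Prop := ∀ (tokens : List String) (func_words : List String), Dom_collapse_fragment_sequences_py tokens func_words → Spec_collapse_fragment_sequences_py tokens func_words (collapse_fragment_sequences_py tokens func_words)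

-- ===== LEMMAS AND PROOFS =====

def pvW (bs : List Bool) (s : Nat) : Nat := ((bs.drop s).take 5).countP id
def pvQual (bs : List Bool) (s : Nat) : Bool := decide (s + 5 ≤ bs.length) && decide (3 ≤ pvW bs s)
def pvC (bs : List Bool) : Nat → Nat
  | 0 => 0
  | i + 1 => if pvQual bs i then i + 5 else pvC bs i

def pvM (bs : List Bool) (i : Nat) : Bool := decide (i < pvC bs (i + 1))

theorem pvC_lt_iff (bs : List Bool) (i j : Nat) :
    j < pvC bs i ↔ ∃ s, s < i ∧ pvQual bs s = true ∧ j < s + 5 := by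
  induction i with
  | zero => simp [pvC]
  | succ i ih =>
    rw [pvC]
    by_cases hq : pvQual bs i = true
    · simp only [hq, if_true]
      constructor
      · intro h; exact ⟨i, Nat.lt_succ_self i, hq, h⟩
      · rintro ⟨s, hs, _, hj⟩; omega
    · simp only [Bool.not_eq_true] at hq
      simp only [hq, Bool.false_eq_true, if_false]
      rw [ih]
      constructor
      · rintro ⟨s, hs, h1, h2⟩; exact ⟨s, Nat.lt_succ_of_lt hs, h1, h2⟩
      · rintro ⟨s, hs, h1, h2⟩
        refine ⟨s, ?_, h1, h2⟩
        rcases Nat.lt_succ_iff_lt_or_eq.mp hs with h | rfl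
        · exact h
        · rw [h1] at hq; exact absurd hq (by simp)

theorem pvCount_eq (bs : List Bool) : ∀ (w s : Nat),
    (List.range' s w).countP (fun j => bs.getD j false) = ((bs.drop s).take w).countP id := by
  intro w
  induction w with
  | zero => simp
  | succ w ih =>
    intro s
    rw [List.range'_succ, List.countP_cons]
    by_cases hs : s < bs.length
    · rw [show bs.drop s = bs[s] :: bs.drop (s + 1) from (List.getElem_cons_drop hs).symm,
        List.take_succ_cons, List.countP_cons]
      have hg : bs.getD s false = bs[s] := by
        simp [List.getD_eq_getElem?_getD, List.getElem?_eq_getElem hs]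
      rw [ih (s + 1), hg]
      simp [id]
    · have h1 : bs.drop s = [] := List.drop_eq_nil_of_le (by omega)
      have h2 : bs.drop (s + 1) = [] := List.drop_eq_nil_of_le (by omega)
      have hg : bs.getD s false = false := by
        rw [List.getD_eq_getElem?_getD, List.getElem?_eq_none (by omega)]
        rfl
      rw [ih (s + 1), hg, h1, h2]
      simp

theorem mark_length : ∀ (w s : Nat) (m : List Bool),
    (List.foldl (fun m j => m.set j true) m (List.range' s w)).length = m.length := by
  intro w
  induction w with
  | zero => simp
  | succ w ih => intro s m; rw [List.range'_succ, List.foldl_cons, ih]; simp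

theorem mark_getD : ∀ (w s : Nat) (m : List Bool) (j : Nat),
    (List.foldl (fun m j => m.set j true) m (List.range' s w)).getD j false
      = (m.getD j false || decide (s ≤ j ∧ j < s + w ∧ j < m.length)) := by
  intro w
  induction w with
  | zero =>
    intro s m j
    have h0 : ¬(s ≤ j ∧ j < s + 0 ∧ j < m.length) := by omega
    simp only [List.range'_zero, List.foldl_nil]
    cases hmg : m.getD j false with
    | true => simp
    | false => simp only [Bool.false_or]; exact (decide_eq_false h0).symm
  | succ w ih =>
    intro s m j
    rw [List.range'_succ, List.foldl_cons, ih (s + 1), List.length_set]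
    have hset : (m.set s true).getD j false
        = (m.getD j false || decide (s = j ∧ j < m.length)) := by
      by_cases h1 : s = j
      · subst h1
        by_cases h2 : s < m.length
        · simp [List.getD_eq_getElem?_getD, h2]
        · simp [List.getD_eq_getElem?_getD, h2]
      · simp [List.getD_eq_getElem?_getD, h1]
    rw [hset]
    cases hmg : m.getD j false with
    | true => simp
    | false =>
      simp only [Bool.false_or, ← Bool.decide_or]
      exact decide_eq_decide.mpr (by omega)

-- the mask-building fold of A
def pvMaskStep (bs : List Bool) (mask : List Bool) (start : Nat) : List Bool :=
  if 3 ≤ ((List.range' start 5).foldl (fun c j => if bs.getD j false then c + 1 else c) (0:Int)) then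
    (List.range' start 5).foldl (fun m j => m.set j true) mask
  else mask

theorem pvMaskStep_cond (bs : List Bool) (start : Nat) :
    (3 ≤ ((List.range' start 5).foldl (fun c j => if bs.getD j false then c + 1 else c) (0:Int)))
      ↔ 3 ≤ pvW bs start := by
  rw [PySem.List.foldl_count_if (fun j => bs.getD j false) (List.range' start 5) 0,
    pvCount_eq bs 5 start]
  constructor
  · intro h; exact_mod_cast by simpa using h
  · intro h; simpa using (by exact_mod_cast h : (3:Int) ≤ ((((bs.drop start).take 5).countP id : Nat) : Int))

theorem pvMaskFold_length (bs : List Bool) (n K : Nat) :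
    ((List.range K).foldl (pvMaskStep bs) (List.replicate n false)).length = n := by
  induction K with
  | zero => simp
  | succ K ih =>
    rw [List.range_succ, List.foldl_append, List.foldl_cons, List.foldl_nil]
    unfold pvMaskStep
    split
    · rw [mark_length]; exact ih
    · exact ih

theorem pvMaskFold_getD (bs : List Bool) (n K : Nat) (hK : K + 4 ≤ n) (hn : n = bs.length)
    (j : Nat) :
    ((List.range K).foldl (pvMaskStep bs) (List.replicate n false)).getD j false
      = decide (∃ s, s < K ∧ pvQual bs s = true ∧ s ≤ j ∧ j < s + 5) := by
  induction K with
  | zero =>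
    have h0 : ¬(∃ s, s < 0 ∧ pvQual bs s = true ∧ s ≤ j ∧ j < s + 5) := by
      rintro ⟨s, hs, -⟩; omega
    rw [decide_eq_false h0]
    simp [List.getD_eq_getElem?_getD, List.getElem?_replicate]
    split <;> rfl
  | succ K ih =>
    have hK' : K + 4 ≤ n := by omega
    rw [List.range_succ, List.foldl_append, List.foldl_cons, List.foldl_nil]
    have hq5 : K + 5 ≤ bs.length := by omega
    set M := (List.range K).foldl (pvMaskStep bs) (List.replicate n false) with hM
    have hlen : M.length = n := pvMaskFold_length bs n K
    unfold pvMaskStep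
    by_cases hc : 3 ≤ pvW bs K
    · rw [if_pos ((pvMaskStep_cond bs K).mpr hc)]
      rw [mark_getD, ih hK', hlen]
      have hqK : pvQual bs K = true := by
        unfold pvQual
        simp [hq5, hc]
      rw [← Bool.decide_or]
      apply decide_eq_decide.mpr
      constructor
      · rintro (⟨s, hs, h1, h2, h3⟩ | ⟨h1, h2, h3⟩)
        · exact ⟨s, by omega, h1, h2, h3⟩
        · exact ⟨K, by omega, hqK, h1, by omega⟩
      · rintro ⟨s, hs, h1, h2, h3⟩
        by_cases hsK : s = K
        · subst hsK; right; exact ⟨h2, by omega, by omega⟩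
        · left; exact ⟨s, by omega, h1, h2, h3⟩
    · rw [if_neg (fun h => hc ((pvMaskStep_cond bs K).mp h))]
      rw [ih hK']
      apply decide_eq_decide.mpr
      constructor
      · rintro ⟨s, hs, h1, h2, h3⟩; exact ⟨s, by omega, h1, h2, h3⟩
      · rintro ⟨s, hs, h1, h2, h3⟩
        refine ⟨s, ?_, h1, h2, h3⟩
        by_cases hsK : s = K
        · subst hsK
          exfalso
          have := (Bool.and_eq_true _ _).mp h1
          exact hc (of_decide_eq_true this.2)
        · omega

theorem pvMask_eq_pvM (bs : List Bool) (n : Nat) (hn : n = bs.length) (h5 : 5 ≤ n) (j : Nat) :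
    ((List.range (n - 5 + 1)).foldl (pvMaskStep bs) (List.replicate n false)).getD j false
      = pvM bs j := by
  rw [pvMaskFold_getD bs n (n - 5 + 1) (by omega) hn j]
  unfold pvM
  rw [decide_eq_decide]
  rw [pvC_lt_iff]
  constructor
  · rintro ⟨s, hs, h1, h2, h3⟩; exact ⟨s, by omega, h1, by omega⟩
  · rintro ⟨s, hs, h1, h2⟩
    have hb : s + 5 ≤ bs.length := of_decide_eq_true ((Bool.and_eq_true _ _).mp h1).1
    exact ⟨s, by omega, h1, by omega, h2⟩

theorem pvPrefix_eq (l : List Int) :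
    l.foldl (fun acc v => acc ++ [acc.getLastD 0 + v]) [0]
      = (List.range (l.length + 1)).map (fun k => (l.take k).sum) := by
  induction l using List.reverseRecOn with
  | nil => simp
  | append_singleton l x ih =>
    rw [List.foldl_append, List.foldl_cons, List.foldl_nil, ih]
    have hlast : ((List.range (l.length + 1)).map (fun k => (l.take k).sum)).getLastD 0
        = l.sum := by
      rw [List.range_succ, List.map_append]
      simp
    rw [hlast]
    rw [List.length_append, List.length_singleton, List.range_succ (n := l.length + 1),
      List.map_append]
    congr 1
    · apply List.map_congr_left
      intro k hk
      rw [List.take_append_of_le_length (by have := List.mem_range.mp hk; omega)]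
    · simp

theorem pvPrefix_getD (l : List Int) (k : Nat) (hk : k ≤ l.length) :
    (l.foldl (fun acc v => acc ++ [acc.getLastD 0 + v]) [0]).getD k 0 = (l.take k).sum := by
  rw [pvPrefix_eq, List.getD_eq_getElem?_getD, List.getElem?_map,
    List.getElem?_range (by omega)]
  rfl

theorem pvPrefix_diff (l : List Int) (i : Nat) (hi : i + 5 ≤ l.length) :
    (l.foldl (fun acc v => acc ++ [acc.getLastD 0 + v]) [0]).getD (i + 5) 0
      - (l.foldl (fun acc v => acc ++ [acc.getLastD 0 + v]) [0]).getD i 0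
      = ((l.drop i).take 5).sum := by
  rw [pvPrefix_getD l (i + 5) hi, pvPrefix_getD l i (by omega), List.take_add,
    List.sum_append]
  ring

theorem pvCondB_eq (tokens : List String) (bs : List Bool) (p : String → Bool)
    (hbs : bs = tokens.map p) (i : Nat) :
    (decide (i + 5 ≤ tokens.length) &&
      decide (3 ≤ ((tokens.map (fun t => if p t then (1:Int) else 0)).foldl
            (fun acc v => acc ++ [acc.getLastD 0 + v]) [0]).getD (i + 5) 0
          - ((tokens.map (fun t => if p t then (1:Int) else 0)).foldl
            (fun acc v => acc ++ [acc.getLastD 0 + v]) [0]).getD i 0))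
      = pvQual bs i := by
  have hlen : bs.length = tokens.length := by rw [hbs]; simp
  have hmm : tokens.map (fun t => if p t then (1:Int) else 0)
      = bs.map (fun b => if b then (1:Int) else 0) := by
    rw [hbs, List.map_map]; rfl
  unfold pvQual
  rw [hlen]
  by_cases hi : i + 5 ≤ tokens.length
  · have hsum : ((tokens.map (fun t => if p t then (1:Int) else 0)).foldl
          (fun acc v => acc ++ [acc.getLastD 0 + v]) [0]).getD (i + 5) 0
        - ((tokens.map (fun t => if p t then (1:Int) else 0)).foldl
          (fun acc v => acc ++ [acc.getLastD 0 + v]) [0]).getD i 0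
        = (pvW bs i : Int) := by
      rw [pvPrefix_diff _ i (by simp; omega), hmm, ← List.map_drop, ← List.map_take,
        PySem.List.sum_map_ite_one_zero (fun b => b)]
      rfl
    rw [hsum]
    congr 1
    rw [decide_eq_decide]
    exact_mod_cast Iff.rfl
  · simp [hi]
def pvBfold (tokens : List String) (M : Nat → Bool) (n i : Nat) (prev : Bool)
    (out : List String) (repl : Int) : List String × Int :=
  if i < n then
    if M i then pvBfold tokens M n (i + 1) true (if prev then out else out ++ ["[…]"]) (repl + 1)
    else pvBfold tokens M n (i + 1) false (out ++ [tokens.getD i ""]) repl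
  else (out, repl)
termination_by n - i
decreasing_by all_goals omega

theorem pvRunA_fst_ge (mask : List Bool) (n : Nat) :
    ∀ (fuel i : Nat) (repl : Int), i ≤ (pvRunA mask n fuel i repl).1 := by
  intro fuel
  induction fuel with
  | zero => intro i repl; simp [pvRunA]
  | succ fuel ih =>
    intro i repl
    rw [pvRunA]
    split
    · exact le_trans (Nat.le_succ i) (ih (i + 1) (repl + 1))
    · simp

theorem pvRunA_le (mask : List Bool) (n : Nat) :
    ∀ (fuel i : Nat) (repl : Int), i ≤ n → (pvRunA mask n fuel i repl).1 ≤ n := by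
  intro fuel
  induction fuel with
  | zero => intro i repl hi; simpa [pvRunA] using hi
  | succ fuel ih =>
    intro i repl hi
    rw [pvRunA]
    split
    · next h => exact ih (i + 1) (repl + 1) h.1
    · exact hi

theorem pvRunA_end (mask : List Bool) (n : Nat) :
    ∀ (fuel i : Nat) (repl : Int), n - i ≤ fuel → i ≤ n →
      (pvRunA mask n fuel i repl).1 = n ∨
        mask.getD (pvRunA mask n fuel i repl).1 false = false := by
  intro fuel
  induction fuel with
  | zero =>
    intro i repl hf hi
    left
    simp only [pvRunA]
    omega
  | succ fuel ih =>
    intro i repl hf hi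
    rw [pvRunA]
    split
    · next h => exact ih (i + 1) (repl + 1) (by omega) h.1
    · next h =>
      by_cases he : i = n
      · exact Or.inl he
      · right
        by_cases hm : mask.getD i false = true
        · exact absurd ⟨by omega, hm⟩ h
        · simpa using hm

theorem pvRun_bfold (tokens : List String) (M : Nat → Bool) (mask : List Bool) (n : Nat)
    (hmask : ∀ j, mask.getD j false = M j) :
    ∀ (fuel i : Nat) (repl : Int) (out : List String), n - i ≤ fuel →
      pvBfold tokens M n i true out repl
        = pvBfold tokens M n (pvRunA mask n fuel i repl).1 true out
            (pvRunA mask n fuel i repl).2 := by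
  intro fuel
  induction fuel with
  | zero => intro i repl out hf; simp [pvRunA]
  | succ fuel ih =>
    intro i repl out hf
    rw [pvRunA]
    split
    · next h =>
      have hM : M i = true := by rw [← hmask]; exact h.2
      rw [pvBfold, if_pos h.1, hM, if_pos rfl]
      exact ih (i + 1) (repl + 1) out (by omega)
    · rfl

theorem pvLoopA_bfold (tokens : List String) (M : Nat → Bool) (mask : List Bool) (n : Nat)
    (hmask : ∀ j, mask.getD j false = M j) :
    ∀ (fuel i : Nat) (out : List String) (repl : Int) (prev : Bool), n - i ≤ fuel →
      prev = false ∨ M i = false →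
      pvLoopA tokens mask n fuel i out repl = pvBfold tokens M n i prev out repl := by
  intro fuel
  induction fuel with
  | zero =>
    intro i out repl prev hf hprev
    rw [pvLoopA, pvBfold, if_neg (by omega)]
  | succ fuel ih =>
    intro i out repl prev hf hprev
    by_cases h : i < n
    · by_cases hm : mask.getD i false = true
      · have hM : M i = true := by rw [← hmask]; exact hm
        have hp : prev = false := by
          rcases hprev with h' | h'
          · exact h'
          · rw [hM] at h'; exact absurd h' (by simp)
        subst hp
        rw [pvLoopA, if_pos h, if_pos hm]
        rw [pvBfold, if_pos h, hM, if_pos rfl]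
        simp only [Bool.false_eq_true, if_false]
        have hni : n - i = (n - (i + 1)) + 1 := by omega
        have hstep : pvRunA mask n (n - i) i repl
            = pvRunA mask n (n - (i + 1)) (i + 1) (repl + 1) := by
          rw [hni, pvRunA, if_pos ⟨h, hm⟩]
        rw [hstep]
        set p := pvRunA mask n (n - (i + 1)) (i + 1) (repl + 1) with hp'
        have hge : i + 1 ≤ p.1 := pvRunA_fst_ge mask n (n - (i + 1)) (i + 1) (repl + 1)
        have hle : p.1 ≤ n := pvRunA_le mask n (n - (i + 1)) (i + 1) (repl + 1) h
        have hend := pvRunA_end mask n (n - (i + 1)) (i + 1) (repl + 1) (by omega) h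
        rw [pvRun_bfold tokens M mask n hmask (n - (i + 1)) (i + 1) (repl + 1)
          (out ++ ["[…]"]) (by omega)]
        by_cases hpn : p.1 = n
        · rw [hpn, pvBfold, if_neg (by omega)]
          cases fuel with
          | zero => rw [pvLoopA]
          | succ f => rw [pvLoopA, if_neg (by omega)]
        · have hMp : M p.1 = false := by
            rcases hend with h' | h'
            · exact absurd h' hpn
            · rw [← hmask]; exact h'
          exact ih p.1 (out ++ ["[…]"]) p.2 true (by omega) (Or.inr hMp)
      · have hM : M i = false := by rw [← hmask]; simpa using hm
        rw [pvLoopA, if_pos h, if_neg hm]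
        rw [pvBfold, if_pos h, hM]
        simp only [Bool.false_eq_true, if_false]
        exact ih (i + 1) (out ++ [tokens.getD i ""]) repl false (by omega) (Or.inl rfl)
    · rw [pvLoopA, if_neg h, pvBfold, if_neg h]

theorem pvB_foldl (tokens : List String) (bs : List Bool) (pfx : List Int) (n : Nat)
    (hcond : ∀ i : Nat,
      (decide (i + 5 ≤ n) && decide (3 ≤ pfx.getD (i + 5) 0 - pfx.getD i 0)) = pvQual bs i)
    (i : Nat) (hi : i ≤ n) (out : List String) (repl : Int) (prev : Bool) :
    (((List.range' i (n - i)).foldl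
        (fun (st : List String × Int × Nat × Bool) i =>
          let out := st.1
          let repl := st.2.1
          let cover := if decide (i + 5 ≤ n) && decide (3 ≤ pfx.getD (i + 5) 0 - pfx.getD i 0)
                       then i + 5 else st.2.2.1
          let prev := st.2.2.2
          if i < cover then
            (if prev then out else out ++ ["[…]"], repl + 1, cover, true)
          else
            (out ++ [tokens.getD i ""], repl, cover, false))
        (out, repl, pvC bs i, prev)).1,
     ((List.range' i (n - i)).foldl
        (fun (st : List String × Int × Nat × Bool) i =>
          let out := st.1
          let repl := st.2.1
          let cover := if decide (i + 5 ≤ n) && decide (3 ≤ pfx.getD (i + 5) 0 - pfx.getD i 0)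
                       then i + 5 else st.2.2.1
          let prev := st.2.2.2
          if i < cover then
            (if prev then out else out ++ ["[…]"], repl + 1, cover, true)
          else
            (out ++ [tokens.getD i ""], repl, cover, false))
        (out, repl, pvC bs i, prev)).2.1)
      = pvBfold tokens (pvM bs) n i prev out repl := by
  by_cases h : i < n
  · have hn : n - i = (n - (i + 1)) + 1 := by omega
    rw [hn, List.range'_succ, List.foldl_cons]
    have hcover : (if decide (i + 5 ≤ n) && decide (3 ≤ pfx.getD (i + 5) 0 - pfx.getD i 0)
        then i + 5 else pvC bs i) = pvC bs (i + 1) := by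
      rw [hcond i]; rfl
    rw [pvBfold, if_pos h]
    cases hM : pvM bs i with
    | true =>
      have hlt : i < pvC bs (i + 1) := of_decide_eq_true hM
      simp only [hcover, if_pos hlt]
      exact pvB_foldl tokens bs pfx n hcond (i + 1) h (if prev then out else out ++ ["[…]"]) (repl + 1) true
    | false =>
      have hlt : ¬ i < pvC bs (i + 1) := by
        intro hc; rw [pvM, decide_eq_true hc] at hM; cases hM
      simp only [hcover, if_neg hlt]
      exact pvB_foldl tokens bs pfx n hcond (i + 1) h (out ++ [tokens.getD i ""]) repl false
  · have hn : n - i = 0 := by omega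
    rw [hn, List.range'_zero, List.foldl_nil, pvBfold, if_neg h]
termination_by n - i
decreasing_by all_goals omega

theorem ports_eq (tokens func_words : List String) :
    collapse_fragment_sequences_py tokens func_words
      = collapse_fragment_sequences_py_alt tokens func_words := by
  unfold collapse_fragment_sequences_py collapse_fragment_sequences_py_alt
  by_cases h5 : tokens.length < 5
  · simp only [h5, if_pos]
  · simp only [h5, if_false]
    have hA : pvLoopA tokens
        ((List.range (tokens.length - 5 + 1)).foldl
          (pvMaskStep (tokens.map (fun t => (PySem.Str.len t == 1) && PySem.Str.strIsalpha t)))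
          (List.replicate tokens.length false))
        tokens.length tokens.length 0 [] 0
        = pvBfold tokens
            (pvM (tokens.map (fun t => (PySem.Str.len t == 1) && PySem.Str.strIsalpha t)))
            tokens.length 0 false [] 0 := by
      exact pvLoopA_bfold tokens _ _ tokens.length
        (fun j => pvMask_eq_pvM _ tokens.length (by simp) (by omega) j)
        tokens.length 0 [] 0 false (by omega) (Or.inl rfl)
    refine Eq.trans hA ?_
    rw [List.range_eq_range']
    exact (pvB_foldl tokens
      (tokens.map (fun t => (PySem.Str.len t == 1) && PySem.Str.strIsalpha t))
      ((tokens.map (fun t => if (PySem.Str.len t == 1) && PySem.Str.strIsalpha t then (1:Int) else 0)).foldl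
        (fun acc v => acc ++ [acc.getLastD 0 + v]) [0])
      tokens.length
      (fun i => pvCondB_eq tokens _ _ rfl i)
      0 (by omega) [] 0 false).symm

-- ===== VERDICT (by name: the statement is the Claim_ definition above) =====
theorem collapse_fragment_sequences_py_spec : Claim_equal_collapse_fragment_sequences_py := by
  intro tokens func_words _
  exact ports_eq tokens func_words
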